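-- pv_equiv track=rewrite | github.com/Balilicious/legal-decisions-recommender | scripts/extract_rs_citations.py | separate_rechtsprechungen
-- ===== SOURCE A (Python) =====
-- def separate_rechtsprechungen(rechtsprechungen):
--     reference_list = []
--     idx = 0
--     for i in range(len(rechtsprechungen)-1):
--         if (rechtsprechungen[i][1] == "I-RS" and rechtsprechungen[i+1][1] == "B-RS") or (rechtsprechungen[i][1] == "B-RS" and rechtsprechungen[i+1][1] == "B-RS"):
--             verweis = rechtsprechungen[idx:i+1]
--             reference_list.append(verweis)
--             idx += len(verweis)
--     reference_list.append(rechtsprechungen[idx:len(rechtsprechungen)])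
--     return reference_list
-- ===== SOURCE B (Python) =====
-- def separate_rechtsprechungen(rechtsprechungen):
--     reference_list = []
--     current = []
--     prev_tag = None
--     for token in rechtsprechungen:
--         if token[1] == "B-RS" and prev_tag in ("I-RS", "B-RS"):
--             reference_list.append(current)
--             current = []
--         current.append(token)
--         prev_tag = token[1]
--     reference_list.append(current)
--     return reference_list
-- ===== Notes on version B (the rewrite author's own statement) =====
-- stated objective: simpler
-- what changed: Replaced the index/slice bookkeeping (cut index idx plus rechtsprechungen[idx:i+1] slicing driven by range(len-1) lookahead) with a single accumulator pass that tracks the previous tag and a current-group buffer, appending tokens and flushing the buffer at group boundaries; no indexing or slicing at all.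
import Mathlib
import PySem

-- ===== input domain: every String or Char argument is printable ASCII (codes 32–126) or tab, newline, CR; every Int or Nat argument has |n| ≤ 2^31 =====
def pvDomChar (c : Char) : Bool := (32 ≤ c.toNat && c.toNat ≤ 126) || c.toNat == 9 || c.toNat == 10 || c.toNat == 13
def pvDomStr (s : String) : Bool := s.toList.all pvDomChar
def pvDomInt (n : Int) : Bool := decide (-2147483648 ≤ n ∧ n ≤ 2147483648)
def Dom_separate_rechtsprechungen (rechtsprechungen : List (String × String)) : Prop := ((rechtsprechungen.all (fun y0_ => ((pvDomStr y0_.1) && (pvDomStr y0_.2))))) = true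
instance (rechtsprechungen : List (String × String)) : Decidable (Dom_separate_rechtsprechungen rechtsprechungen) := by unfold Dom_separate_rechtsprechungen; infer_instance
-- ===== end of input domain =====

-- B replaces A's cut-index/slice bookkeeping by one accumulator pass (previous tag +
-- current-group buffer); same return value, objective: simpler.

-- ===== PORT A =====
-- loop body of A's 'for i in range(len(rechtsprechungen)-1)'; state = (reference_list, idx)
def pvAStep (rs : List (String × String)) (st : List (List (String × String)) × Int) (i : Int) :
    List (List (String × String)) × Int :=
  if ((PySem.List.pyGetD rs i ("", "")).2 == "I-RS" && (PySem.List.pyGetD rs (i+1) ("", "")).2 == "B-RS")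
     || ((PySem.List.pyGetD rs i ("", "")).2 == "B-RS" && (PySem.List.pyGetD rs (i+1) ("", "")).2 == "B-RS") then
    let verweis := PySem.List.slice rs (some st.2) (some (i+1))
    (st.1 ++ [verweis], st.2 + (verweis.length : Int))
  else st

def separate_rechtsprechungen (rechtsprechungen : List (String × String)) : List (List (String × String)) :=
  let st := (PySem.List.pyRange 0 ((rechtsprechungen.length : Int) - 1) 1).foldl (pvAStep rechtsprechungen) ([], 0)
  st.1 ++ [PySem.List.slice rechtsprechungen (some st.2) (some ((rechtsprechungen.length : Int)))]

-- ===== PORT B =====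
-- loop body of B's 'for token in rechtsprechungen'; state = (reference_list, current, prev_tag)
def pvBStep (st : List (List (String × String)) × List (String × String) × Option String)
    (token : String × String) :
    List (List (String × String)) × List (String × String) × Option String :=
  let st2 := if token.2 == "B-RS" && (st.2.2 == some "I-RS" || st.2.2 == some "B-RS")
    then (st.1 ++ [st.2.1], ([] : List (String × String))) else (st.1, st.2.1)
  (st2.1, st2.2 ++ [token], some token.2)

def separate_rechtsprechungen_alt (rechtsprechungen : List (String × String)) : List (List (String × String)) :=
  let st := rechtsprechungen.foldl pvBStep ([], [], none)
  st.1 ++ [st.2.1]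

-- ===== PRECONDITION & SPEC =====
def Spec_separate_rechtsprechungen (rechtsprechungen : List (String × String)) (out : List (List (String × String))) : Prop := out = separate_rechtsprechungen_alt rechtsprechungen
instance (rechtsprechungen : List (String × String)) (out : List (List (String × String))) : Decidable (Spec_separate_rechtsprechungen rechtsprechungen out) := by unfold Spec_separate_rechtsprechungen; infer_instance

-- ===== CLAIM (what is proved, stated in full; the proofs are below) =====
def Claim_equal_separate_rechtsprechungen : Prop := ∀ (rechtsprechungen : List (String × String)), Dom_separate_rechtsprechungen rechtsprechungen → Spec_separate_rechtsprechungen rechtsprechungen (separate_rechtsprechungen rechtsprechungen)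

-- ===== LEMMAS AND PROOFS =====

-- Invariant relating A's fold over range i with B's fold over the first i+1 tokens:
-- the emitted groups agree, B's buffer is the slice rs[idx : i+1], and prev_tag is rs[i]'s tag.
theorem pv_inv (rs : List (String × String)) (i : Nat) (hi : i < rs.length) :
    ∃ j : Nat, j ≤ i ∧
      ((PySem.List.pyRange 0 (i : Int) 1).foldl (pvAStep rs) ([], 0)).2 = (j : Int) ∧
      ((rs.take (i+1)).foldl pvBStep ([], [], none)).1
        = ((PySem.List.pyRange 0 (i : Int) 1).foldl (pvAStep rs) ([], 0)).1 ∧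
      ((rs.take (i+1)).foldl pvBStep ([], [], none)).2.1 = (rs.drop j).take (i+1-j) ∧
      ((rs.take (i+1)).foldl pvBStep ([], [], none)).2.2 = some (rs[i].2) := by
  induction i with
  | zero =>
    refine ⟨0, le_refl 0, ?_, ?_, ?_, ?_⟩ <;>
    · cases rs with
      | nil => simp at hi
      | cons x t =>
        simp [PySem.List.pyRange_one_eq_nil (le_refl (0:Int)), pvBStep]
  | succ i ih =>
    have hi' : i < rs.length := by omega
    obtain ⟨j, hj, hidx, hres, hcur, hprev⟩ := ih hi'
    have hcast : ((i+1 : Nat) : Int) = (i : Int) + 1 := by push_cast; ring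
    have hrange : PySem.List.pyRange 0 ((i+1 : Nat) : Int) 1
        = PySem.List.pyRange 0 (i : Int) 1 ++ [(i : Int)] := by
      rw [hcast]; exact PySem.List.pyRange_one_succ_right (by positivity)
    have htake : rs.take (i+1+1) = rs.take (i+1) ++ [rs[i+1]] := by
      rw [List.take_add_one, List.getElem?_eq_getElem hi]; rfl
    rw [hrange, htake, List.foldl_append, List.foldl_append, List.foldl_cons, List.foldl_nil,
        List.foldl_cons, List.foldl_nil]
    set aSt := (PySem.List.pyRange 0 (i : Int) 1).foldl (pvAStep rs) ([], 0) with haSt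
    set bSt := (rs.take (i+1)).foldl pvBStep ([], [], none) with hbSt
    have hget0 : PySem.List.pyGetD rs (i : Int) ("", "") = rs[i] := by
      rw [PySem.List.pyGetD_natCast, List.getD_eq_getElem?_getD, List.getElem?_eq_getElem hi']
      rfl
    have hget1 : PySem.List.pyGetD rs ((i : Int) + 1) ("", "") = rs[i+1] := by
      rw [← hcast, PySem.List.pyGetD_natCast, List.getD_eq_getElem?_getD,
        List.getElem?_eq_getElem hi]
      rfl
    have hcond : (rs[i+1].2 == "B-RS" && (bSt.2.2 == some "I-RS" || bSt.2.2 == some "B-RS"))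
        = ((PySem.List.pyGetD rs (i : Int) ("", "")).2 == "I-RS"
             && (PySem.List.pyGetD rs ((i:Int)+1) ("", "")).2 == "B-RS"
           || (PySem.List.pyGetD rs (i : Int) ("", "")).2 == "B-RS"
             && (PySem.List.pyGetD rs ((i:Int)+1) ("", "")).2 == "B-RS") := by
      rw [hget0, hget1, hprev]
      simp only [Option.some_beq_some]
      cases rs[i].2 == "I-RS" <;> cases rs[i].2 == "B-RS" <;> cases rs[i+1].2 == "B-RS" <;> simp
    by_cases hc : (rs[i+1].2 == "B-RS" && (bSt.2.2 == some "I-RS" || bSt.2.2 == some "B-RS")) = true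
    · -- boundary: A emits the slice, B flushes the buffer
      have hslice : PySem.List.slice rs (some ((j : Nat) : Int)) (some ((i : Int) + 1))
          = (rs.drop j).take (i+1-j) := by
        rw [← hcast, PySem.List.slice_natCast]
      have hlen : ((rs.drop j).take (i+1-j)).length = i+1-j := by
        simp only [List.length_take, List.length_drop]
        omega
      refine ⟨i+1, le_refl _, ?_, ?_, ?_, ?_⟩
      · simp only [pvAStep, ← hcond, hc, if_true, hidx, hslice, hlen]
        push_cast; omega
      · simp only [pvAStep, pvBStep, ← hcond, hc, if_true, hidx, hslice]
        rw [hres, hcur]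
      · have h1 : (rs.drop (i+1)).take 1 = [rs[i+1]] := by
          rw [List.take_one, List.head?_drop, List.getElem?_eq_getElem hi]
          rfl
        simp only [pvBStep, hc, if_true, List.nil_append]
        rw [show i+1+1-(i+1) = 1 from by omega, h1]
      · simp [pvBStep]
    · -- no boundary: A's state is unchanged, B extends the buffer
      have hc' : (rs[i+1].2 == "B-RS" && (bSt.2.2 == some "I-RS" || bSt.2.2 == some "B-RS")) = false := by
        simpa using hc
      refine ⟨j, by omega, ?_, ?_, ?_, ?_⟩
      · simp only [pvAStep, ← hcond, hc']
        exact hidx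
      · simp only [pvAStep, pvBStep, ← hcond, hc']
        exact hres
      · simp only [pvBStep, hc']
        rw [hcur]
        have : i+1+1-j = (i+1-j)+1 := by omega
        rw [this, List.take_add_one, List.getElem?_drop]
        have : j + (i+1-j) = i+1 := by omega
        rw [this, List.getElem?_eq_getElem hi]
        rfl
      · simp [pvBStep]

-- ===== VERDICT (by name: the statement is the Claim_ definition above) =====
theorem separate_rechtsprechungen_spec : Claim_equal_separate_rechtsprechungen := by
  intro rs _
  unfold Spec_separate_rechtsprechungen
  cases rs with
  | nil => rfl
  | cons x t =>
    obtain ⟨j, hj, hidx, hres, hcur, hprev⟩ := pv_inv (x :: t) t.length (by simp)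
    have hn : ((x :: t).length : Int) - 1 = (t.length : Nat) := by simp
    have htk : (x :: t).take (t.length + 1) = x :: t := by
      rw [show t.length + 1 = (x :: t).length from rfl, List.take_length]
    simp only [separate_rechtsprechungen, separate_rechtsprechungen_alt]
    rw [hn] at *
    rw [htk] at hres hcur
    rw [hres, hcur, hidx]
    have hlen : ((x :: t).length : Int) = ((t.length + 1 : Nat) : Int) := by push_cast; simp
    rw [hlen, PySem.List.slice_natCast]
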